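-- pv_equiv track=rewrite | github.com/MikalaiDrabovich/TensorScope | tensorscope/tensorscope.py | add_path_with_const
-- ===== SOURCE A (Python) =====
-- def add_path_with_const(name_from_metadata):
--     current_node_path_parts = name_from_metadata.split('/')
--     for i, node in enumerate(current_node_path_parts):
--         node_loc = node+''
--         node_loc = node_loc.split(':')
--         for j, nd in enumerate(node_loc):
--             nd = nd.split('_')
--             nd = [n if not n.isdigit() else 'tensorscopeN'  for n in nd ]
--             node_loc[j] = '_'.join(nd)
--         node_loc = ':'.join(node_loc)
--         current_node_path_parts[i] = node_loc
--
--     return '/'.join(current_node_path_parts)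
-- ===== SOURCE B (Python) =====
-- def add_path_with_const(name_from_metadata):
--     out = ''
--     token = ''
--     for ch in name_from_metadata:
--         if ch in '/:_':
--             out += ('tensorscopeN' if token.isdigit() else token) + ch
--             token = ''
--         else:
--             token += ch
--     return out + ('tensorscopeN' if token.isdigit() else token)
-- ===== Notes on version B (the rewrite author's own statement) =====
-- stated objective: simpler
-- what changed: Replaces the three nested split/join passes (split on '/', then ':', then '_', rejoin at each level) with a single left-to-right character scan that flushes the current token at every delimiter, substituting 'tensorscopeN' for all-digit tokens.
import Mathlib
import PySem

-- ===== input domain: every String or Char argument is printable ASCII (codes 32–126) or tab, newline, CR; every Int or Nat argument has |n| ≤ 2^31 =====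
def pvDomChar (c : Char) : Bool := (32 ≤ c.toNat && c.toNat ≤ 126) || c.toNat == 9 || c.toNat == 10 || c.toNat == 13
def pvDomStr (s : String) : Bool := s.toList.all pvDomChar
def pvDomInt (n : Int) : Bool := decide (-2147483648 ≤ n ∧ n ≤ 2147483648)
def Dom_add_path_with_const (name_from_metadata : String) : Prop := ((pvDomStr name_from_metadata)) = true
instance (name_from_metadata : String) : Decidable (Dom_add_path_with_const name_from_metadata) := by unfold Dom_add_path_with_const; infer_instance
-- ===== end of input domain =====

-- B replaces A's three nested split/join passes (on '/', ':', '_') by a single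
-- left-to-right character scan flushing the current token at each delimiter (simpler).


-- ===== PORT A =====
-- 'n if not n.isdigit() else "tensorscopeN"'
def aRepl (n : List Char) : List Char :=
  if ¬ PySem.Chars.strIsdigit n then n else "tensorscopeN".toList

-- inner loop body: nd = nd.split('_'); replace digit pieces; '_'.join(nd)
def aInner (nd : List Char) : List Char :=
  PySem.Chars.join ['_'] ((PySem.Chars.splitOn nd ['_']).map aRepl)

-- per path component: split on ':', process each, ':'.join
def aNode (node : List Char) : List Char :=
  PySem.Chars.join [':'] ((PySem.Chars.splitOn node [':']).map aInner)

def add_path_with_const (name_from_metadata : String) : String :=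
  String.ofList (PySem.Chars.join ['/']
    ((PySem.Chars.splitOn name_from_metadata.toList ['/']).map aNode))

-- ===== PORT B =====
-- ch in '/:_'
def bIsDelim (c : Char) : Bool := c == '/' || c == ':' || c == '_'

-- 'tensorscopeN' if token.isdigit() else token
def bRepl (token : List Char) : List Char :=
  if PySem.Chars.strIsdigit token then "tensorscopeN".toList else token

-- the single scan: current token is the first argument, remaining input the second
def bGo (token : List Char) : List Char → List Char
  | [] => bRepl token
  | c :: rest =>
      if bIsDelim c then (bRepl token ++ [c]) ++ bGo [] rest
      else bGo (token ++ [c]) rest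

def add_path_with_const_alt (name_from_metadata : String) : String :=
  String.ofList (bGo [] name_from_metadata.toList)

-- ===== PRECONDITION & SPEC =====
def Spec_add_path_with_const (name_from_metadata : String) (out : String) : Prop := out = add_path_with_const_alt name_from_metadata
instance (name_from_metadata : String) (out : String) : Decidable (Spec_add_path_with_const name_from_metadata out) := by unfold Spec_add_path_with_const; infer_instance

-- ===== CLAIM (what is proved, stated in full; the proofs are below) =====
def Claim_equal_add_path_with_const : Prop := ∀ (name_from_metadata : String), Dom_add_path_with_const name_from_metadata → Spec_add_path_with_const name_from_metadata (add_path_with_const name_from_metadata)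

-- ===== LEMMAS AND PROOFS =====

-- simple structural characterisation of splitOn with a single-character separator
def mySplit (c : Char) : List Char → List (List Char)
  | [] => [[]]
  | d :: rest => if d = c then [] :: mySplit c rest
                 else ((mySplit c rest).headD []).cons d :: (mySplit c rest).tail

theorem mySplit_ne_nil (c : Char) (cs : List Char) : mySplit c cs ≠ [] := by
  cases cs with
  | nil => simp [mySplit]
  | cons d rest => simp only [mySplit]; split <;> simp

theorem splitOn_go_eq (c : Char) (fuel : Nat) (l cur : List Char)
    (acc : List (List Char)) (h : l.length ≤ fuel) :
    PySem.Chars.splitOn.go [c] fuel l cur acc =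
      acc.reverse ++ ((cur.reverse ++ (mySplit c l).headD []) :: (mySplit c l).tail) := by
  induction fuel generalizing l cur acc with
  | zero =>
      have : l = [] := List.length_eq_zero_iff.mp (Nat.le_zero.mp h)
      subst this
      simp [PySem.Chars.splitOn.go, mySplit]
  | succ fuel ih =>
      cases l with
      | nil => simp [PySem.Chars.splitOn.go, mySplit]
      | cons d rest =>
          by_cases hd : d = c
          · subst hd
            have hpre : List.isPrefixOf [d] (d :: rest) = true := by
              simp [List.isPrefixOf]
            rw [PySem.Chars.splitOn.go]
            simp only [hpre, if_true]
            have hdrop : List.drop [d].length (d :: rest) = rest := rfl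
            rw [hdrop, ih rest [] (cur.reverse :: acc) (by simpa using Nat.le_of_succ_le_succ h)]
            rcases hs : mySplit d rest with _ | ⟨hh, tt⟩
            · exact absurd hs (mySplit_ne_nil d rest)
            · simp [mySplit, hs]
          · have hpre : List.isPrefixOf [c] (d :: rest) = false := by
              simp [List.isPrefixOf]; exact fun hc => (hd hc.symm).elim
            rw [PySem.Chars.splitOn.go]
            simp only [hpre, Bool.false_eq_true, if_false]
            rw [ih rest (d :: cur) acc (by simpa using Nat.le_of_succ_le_succ h)]
            simp [mySplit, hd]

theorem splitOn_eq (c : Char) (cs : List Char) :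
    PySem.Chars.splitOn cs [c] = mySplit c cs := by
  rw [PySem.Chars.splitOn, splitOn_go_eq c (cs.length + 1) cs [] [] (by omega)]
  rcases h : mySplit c cs with _ | ⟨hh, tt⟩
  · exact absurd h (mySplit_ne_nil c cs)
  · simp

-- mySplit over a separator-free prefix
theorem mySplit_append_free (c : Char) (xs ys : List Char) (hfree : c ∉ xs) :
    mySplit c (xs ++ ys) =
      (xs ++ (mySplit c ys).headD []) :: (mySplit c ys).tail := by
  induction xs with
  | nil =>
      rcases h : mySplit c ys with _ | ⟨hh, tt⟩
      · exact absurd h (mySplit_ne_nil c ys)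
      · simp [h]
  | cons d xs ih =>
      have hd : d ≠ c := fun h => hfree (h ▸ List.mem_cons_self)
      have : mySplit c (xs ++ ys) =
          (xs ++ (mySplit c ys).headD []) :: (mySplit c ys).tail :=
        ih (fun h => hfree (List.mem_cons_of_mem _ h))
      simp [mySplit, hd, this]

theorem mySplit_free (c : Char) (xs : List Char) (hfree : c ∉ xs) :
    mySplit c xs = [xs] := by
  have := mySplit_append_free c xs [] hfree
  simpa [mySplit] using this

theorem mySplit_delim (c : Char) (xs ys : List Char) (hfree : c ∉ xs) :
    mySplit c (xs ++ c :: ys) = xs :: mySplit c ys := by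
  rw [mySplit_append_free c xs (c :: ys) hfree]
  rcases h : mySplit c ys with _ | ⟨hh, tt⟩
  · exact absurd h (mySplit_ne_nil c ys)
  · simp [mySplit, h]

-- join of a cons whose head carries an extra prefix
theorem join_head_append (sep a b : List Char) (l : List (List Char)) :
    PySem.Chars.join sep ((a ++ b) :: l) = a ++ PySem.Chars.join sep (b :: l) := by
  cases l with
  | nil => simp [PySem.Chars.join_singleton]
  | cons x xs => simp [PySem.Chars.join_cons_cons]

-- A's three levels, written over mySplit
def P1 (cs : List Char) : List Char :=
  PySem.Chars.join ['_'] ((mySplit '_' cs).map aRepl)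
def P2 (cs : List Char) : List Char :=
  PySem.Chars.join [':'] ((mySplit ':' cs).map P1)
def P3 (cs : List Char) : List Char :=
  PySem.Chars.join ['/'] ((mySplit '/' cs).map P2)

theorem aInner_eq : aInner = P1 := by
  funext cs; simp [aInner, P1, splitOn_eq]

theorem aNode_eq : aNode = P2 := by
  funext cs; simp [aNode, P2, splitOn_eq, aInner_eq]

theorem P1_free (cs : List Char) (h : '_' ∉ cs) : P1 cs = aRepl cs := by
  simp [P1, mySplit_free _ _ h, PySem.Chars.join_singleton]

theorem P2_free (cs : List Char) (h1 : ':' ∉ cs) (h2 : '_' ∉ cs) :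
    P2 cs = aRepl cs := by
  simp [P2, mySplit_free _ _ h1, PySem.Chars.join_singleton, P1_free _ h2]

theorem P3_free (cs : List Char) (h0 : '/' ∉ cs) (h1 : ':' ∉ cs) (h2 : '_' ∉ cs) :
    P3 cs = aRepl cs := by
  simp [P3, mySplit_free _ _ h0, PySem.Chars.join_singleton, P2_free _ h1 h2]

theorem P1_split (tok rest : List Char) (h : '_' ∉ tok) :
    P1 (tok ++ '_' :: rest) = aRepl tok ++ '_' :: P1 rest := by
  rw [P1, mySplit_delim _ _ _ h]
  rcases hs : mySplit '_' rest with _ | ⟨hh, tt⟩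
  · exact absurd hs (mySplit_ne_nil _ rest)
  · simp [PySem.Chars.join_cons_cons, P1, hs]

-- delimiter step: for any of the three delimiters d and a delimiter-free token,
-- A's nested processing of tok ++ d :: rest is aRepl tok ++ d :: (processing of rest)
theorem P3_delim (d : Char) (tok rest : List Char)
    (hd : d = '/' ∨ d = ':' ∨ d = '_')
    (h0 : '/' ∉ tok) (h1 : ':' ∉ tok) (h2 : '_' ∉ tok) :
    P3 (tok ++ d :: rest) = aRepl tok ++ d :: P3 rest := by
  rcases hd with hd | hd | hd <;> subst hd
  · -- '/'
    rw [P3, mySplit_delim _ _ _ h0]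
    rcases hs : mySplit '/' rest with _ | ⟨hh, tt⟩
    · exact absurd hs (mySplit_ne_nil _ rest)
    · simp [PySem.Chars.join_cons_cons, P3, hs, P2_free _ h1 h2]
  · -- ':'
    rcases hs : mySplit '/' rest with _ | ⟨hh, tt⟩
    · exact absurd hs (mySplit_ne_nil _ rest)
    · have hfree : '/' ∉ tok ++ [':'] := by simp [h0]
      have : tok ++ ':' :: rest = (tok ++ [':']) ++ rest := by simp
      rw [P3, this, mySplit_append_free _ _ _ hfree, hs]
      have hhd : (tok ++ [':']) ++ hh = tok ++ ':' :: hh := by simp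
      simp only [List.headD_cons, List.tail_cons, List.map_cons, hhd]
      -- P2 (tok ++ ':' :: hh) = aRepl tok ++ ':' :: P2 hh
      have hP2 : P2 (tok ++ ':' :: hh) = aRepl tok ++ ':' :: P2 hh := by
        rw [P2, mySplit_delim _ _ _ h1]
        rcases hs1 : mySplit ':' hh with _ | ⟨k, kt⟩
        · exact absurd hs1 (mySplit_ne_nil _ hh)
        · simp [PySem.Chars.join_cons_cons, P2, hs1, P1_free _ h2]
      rw [hP2]
      have : aRepl tok ++ ':' :: P2 hh = (aRepl tok ++ [':']) ++ P2 hh := by simp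
      rw [this, join_head_append]
      simp [P3, hs]
  · -- '_'
    rcases hs : mySplit '/' rest with _ | ⟨hh, tt⟩
    · exact absurd hs (mySplit_ne_nil _ rest)
    · have hfree : '/' ∉ tok ++ ['_'] := by simp [h0]
      have : tok ++ '_' :: rest = (tok ++ ['_']) ++ rest := by simp
      rw [P3, this, mySplit_append_free _ _ _ hfree, hs]
      have hhd : (tok ++ ['_']) ++ hh = tok ++ '_' :: hh := by simp
      simp only [List.headD_cons, List.tail_cons, List.map_cons, hhd]
      have hP2 : P2 (tok ++ '_' :: hh) = aRepl tok ++ '_' :: P2 hh := by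
        rcases hs1 : mySplit ':' hh with _ | ⟨k, kt⟩
        · exact absurd hs1 (mySplit_ne_nil _ hh)
        · have hfree1 : ':' ∉ tok ++ ['_'] := by simp [h1]
          have e1 : tok ++ '_' :: hh = (tok ++ ['_']) ++ hh := by simp
          rw [P2, e1, mySplit_append_free _ _ _ hfree1, hs1]
          have e2 : (tok ++ ['_']) ++ k = tok ++ '_' :: k := by simp
          simp only [List.headD_cons, List.tail_cons, List.map_cons, e2]
          rw [P1_split _ _ h2]
          have : aRepl tok ++ '_' :: P1 k = (aRepl tok ++ ['_']) ++ P1 k := by simp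
          rw [this, join_head_append]
          simp [P2, hs1]
      rw [hP2]
      have : aRepl tok ++ '_' :: P2 hh = (aRepl tok ++ ['_']) ++ P2 hh := by simp
      rw [this, join_head_append]
      simp [P3, hs]

theorem bRepl_eq_aRepl : bRepl = aRepl := by
  funext cs; simp [bRepl, aRepl]; split <;> simp_all

theorem free_of_hfree (tok : List Char)
    (hfree : ∀ d ∈ tok, bIsDelim d = false) :
    '/' ∉ tok ∧ ':' ∉ tok ∧ '_' ∉ tok := by
  refine ⟨fun h => ?_, fun h => ?_, fun h => ?_⟩ <;> simpa [bIsDelim] using hfree _ h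

theorem bGo_eq_P3 (cs tok : List Char)
    (hfree : ∀ d ∈ tok, bIsDelim d = false) :
    bGo tok cs = P3 (tok ++ cs) := by
  induction cs generalizing tok with
  | nil =>
      obtain ⟨h0, h1, h2⟩ := free_of_hfree tok hfree
      simp only [bGo, List.append_nil]
      rw [P3_free _ h0 h1 h2, bRepl_eq_aRepl]
  | cons c rest ih =>
      obtain ⟨h0, h1, h2⟩ := free_of_hfree tok hfree
      by_cases hc : bIsDelim c = true
      · have hd : c = '/' ∨ c = ':' ∨ c = '_' := by
          simpa [bIsDelim, or_assoc] using hc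
        rw [bGo, if_pos hc, P3_delim c tok rest hd h0 h1 h2,
            ih [] (by simp), bRepl_eq_aRepl]
        simp
      · have hfree' : ∀ d ∈ tok ++ [c], bIsDelim d = false := by
          intro d hdm
          rcases List.mem_append.mp hdm with h | h
          · exact hfree d h
          · simp at h; subst h; simpa using hc
        rw [bGo, if_neg hc, ih (tok ++ [c]) hfree']
        simp

-- ===== VERDICT (by name: the statement is the Claim_ definition above) =====
theorem add_path_with_const_spec : Claim_equal_add_path_with_const := by
  intro s _
  unfold Spec_add_path_with_const add_path_with_const add_path_with_const_alt
  rw [bGo_eq_P3 s.toList [] (by simp), List.nil_append, splitOn_eq, aNode_eq]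
  simp [P3]
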